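-- pv_equiv track=rewrite | github.com/user1689/91_leetcode_memo | review/Banana/amazonOA/Gray_Graph.py | grey
-- ===== SOURCE A (Python) =====
-- def grey(matrix):
--     row = len(matrix)
--     col = len(matrix[0])
--     rowArr = [0 for _ in range(row)]
--     colArr = [0 for _ in range(col)]
--
--     for i in range(row):
--         tmp = matrix[i]
--         cnt = 0
--         for j in range(col):
--             if tmp[j] == '1':
--                 cnt += 1
--             else:
--                 cnt -= 1
--         rowArr[i] = cnt
--
--     for j in range(col):
--         cnt = 0
--         for i in range(row):
--             if (matrix[i][j] == '1'):
--                 cnt += 1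
--             else:
--                 cnt -= 1
--         colArr[j] = cnt
--
--     res = 0
--     for i in range(row):
--         for j in range(col):
--             res = max(res, rowArr[i] + colArr[j])
--     return res
-- ===== SOURCE B (Python) =====
-- def grey(matrix):
--     col = len(matrix[0])
--     row_sums = [sum(1 if r[j] == '1' else -1 for j in range(col)) for r in matrix]
--     col_sums = [sum(1 if r[j] == '1' else -1 for r in matrix) for j in range(col)]
--     best = max(row_sums) + max(col_sums) if col_sums else 0
--     return max(0, best)
-- ===== Notes on version B (the rewrite author's own statement) =====
-- stated objective: simpler
-- what changed: The quadratic final double loop maximising rowArr[i]+colArr[j] over all pairs is replaced by the closed form max(0, max(row_sums)+max(col_sums)), and the per-row/per-column counts are built as sum-comprehensions instead of index-mutating loops.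
import Mathlib
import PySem

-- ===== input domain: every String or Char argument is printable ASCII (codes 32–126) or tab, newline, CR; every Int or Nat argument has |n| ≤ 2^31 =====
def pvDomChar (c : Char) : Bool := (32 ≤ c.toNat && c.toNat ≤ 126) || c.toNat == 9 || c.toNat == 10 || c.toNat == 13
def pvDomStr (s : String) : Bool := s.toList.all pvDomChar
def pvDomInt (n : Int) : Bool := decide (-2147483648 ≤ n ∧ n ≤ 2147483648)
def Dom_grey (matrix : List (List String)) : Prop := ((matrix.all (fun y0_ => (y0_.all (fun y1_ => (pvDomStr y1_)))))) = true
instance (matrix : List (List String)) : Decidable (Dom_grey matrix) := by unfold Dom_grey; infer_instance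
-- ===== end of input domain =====

-- B replaces A's quadratic pairing loop res = max over all (i,j) of rowArr[i]+colArr[j]
-- by the closed form max(0, max(row_sums)+max(col_sums)); objective: simpler.

-- ===== PORT A =====
def grey (matrix : List (List String)) : Int :=
  let row : Int := PySem.List.len matrix
  let col : Int := PySem.List.len (PySem.List.pyGetD matrix 0 [])
  let rowArr : List Int := (PySem.List.pyRange 0 row 1).map (fun i =>
    let tmp := PySem.List.pyGetD matrix i []
    (PySem.List.pyRange 0 col 1).foldl
      (fun cnt j => if PySem.List.pyGetD tmp j "" = "1" then cnt + 1 else cnt - 1) 0)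
  let colArr : List Int := (PySem.List.pyRange 0 col 1).map (fun j =>
    (PySem.List.pyRange 0 row 1).foldl
      (fun cnt i => if PySem.List.pyGetD (PySem.List.pyGetD matrix i []) j "" = "1" then cnt + 1 else cnt - 1) 0)
  (PySem.List.pyRange 0 row 1).foldl (fun res i =>
    (PySem.List.pyRange 0 col 1).foldl
      (fun res j => max res (PySem.List.pyGetD rowArr i 0 + PySem.List.pyGetD colArr j 0)) res) 0

-- ===== PORT B =====
def grey_alt (matrix : List (List String)) : Int :=
  let col : Int := PySem.List.len (PySem.List.pyGetD matrix 0 [])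
  let rowSums : List Int := matrix.map (fun r =>
    ((PySem.List.pyRange 0 col 1).map
      (fun j => if PySem.List.pyGetD r j "" = "1" then (1 : Int) else -1)).sum)
  let colSums : List Int := (PySem.List.pyRange 0 col 1).map (fun j =>
    (matrix.map (fun r => if PySem.List.pyGetD r j "" = "1" then (1 : Int) else -1)).sum)
  let best : Int :=
    if colSums ≠ [] then
      (PySem.List.max? rowSums (fun x => x)).getD 0 + (PySem.List.max? colSums (fun x => x)).getD 0
    else 0
  max 0 best

-- ===== PRECONDITION & SPEC =====
-- Pre_ excludes exactly the inputs where the Python A raises IndexError: the empty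
-- matrix (matrix[0]) and matrices with a row shorter than the first row (tmp[j]/matrix[i][j]).
def Pre_grey (matrix : List (List String)) : Prop :=
  matrix ≠ [] ∧ ∀ r ∈ matrix, (matrix.headD []).length ≤ r.length
instance (matrix : List (List String)) : Decidable (Pre_grey matrix) := by
  unfold Pre_grey; infer_instance
def pvWitness_grey : List (List String) := [["1", "0"], ["0", "1"]]

def Spec_grey (matrix : List (List String)) (out : Int) : Prop := out = grey_alt matrix
instance (matrix : List (List String)) (out : Int) : Decidable (Spec_grey matrix out) := by unfold Spec_grey; infer_instance

-- ===== CLAIM (what is proved, stated in full; the proofs are below) =====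
def Claim_equal_grey : Prop := ∀ (matrix : List (List String)), Dom_grey matrix → Pre_grey matrix → Spec_grey matrix (grey matrix)

-- ===== LEMMAS AND PROOFS =====

-- folding max starting from a join splits off the left component
theorem foldl_max_init (l : List Int) (a b : Int) :
    l.foldl max (max a b) = max a (l.foldl max b) := by
  induction l generalizing b with
  | nil => simp
  | cons x t ih => simp only [List.foldl_cons, max_assoc, ih]

-- adding a constant commutes with the running max
theorem foldl_max_add (t : List Int) (a x : Int) :
    (t.map (fun b => a + b)).foldl max (a + x) = a + t.foldl max x := by
  induction t generalizing x with
  | nil => simp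
  | cons z t ih => simp only [List.map_cons, List.foldl_cons, max_add_add_left, ih]

-- collapsing the inner loop: fold of max res (a + b) over a nonempty list
theorem foldl_max_add_eq (y : Int) (t : List Int) (a res : Int) :
    (y :: t).foldl (fun r b => max r (a + b)) res = max res (a + t.foldl max y) := by
  have h : (y :: t).foldl (fun r b => max r (a + b)) res
      = ((y :: t).map (fun b => a + b)).foldl max res := by
    rw [List.foldl_map]
  rw [h, List.map_cons, List.foldl_cons, foldl_max_init, foldl_max_add]

-- the branch body of A equals accumulating a ±1 term
theorem foldl_if_eq_sum (P : Int → Prop) [DecidablePred P] (L : List Int) (init : Int) :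
    L.foldl (fun cnt j => if P j then cnt + 1 else cnt - 1) init
      = init + (L.map (fun j => if P j then (1 : Int) else -1)).sum := by
  induction L generalizing init with
  | nil => simp
  | cons x t ih =>
    simp only [List.foldl_cons, List.map_cons, List.sum_cons, ih]
    split_ifs <;> ring

-- the same for folding over rows
theorem foldl_if_row_eq_sum (P : List String → Prop) [DecidablePred P]
    (L : List (List String)) (init : Int) :
    L.foldl (fun cnt r => if P r then cnt + 1 else cnt - 1) init
      = init + (L.map (fun r => if P r then (1 : Int) else -1)).sum := by
  induction L generalizing init with
  | nil => simp
  | cons x t ih =>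
    simp only [List.foldl_cons, List.map_cons, List.sum_cons, ih]
    split_ifs <;> ring

theorem map_over_rows {b : Type} (M : List (List String)) (F : List String → b) :
    (PySem.List.pyRange 0 (PySem.List.len M)).map (fun i => F (PySem.List.pyGetD M i [])) = M.map F := by
  conv_rhs => rw [← PySem.List.map_pyGetD_pyRange_zero M ([] : List String)]
  rw [List.map_map]
  rfl

-- the collapsed final phase: fold of pairwise max over two lists vs max+max
theorem double_fold_max (RA CA : List Int) (hRA : RA ≠ []) :
    RA.foldl (fun res a => CA.foldl (fun r b => max r (a + b)) res) 0
      = max 0 (if CA ≠ [] then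
          (PySem.List.max? RA (fun x => x)).getD 0 + (PySem.List.max? CA (fun x => x)).getD 0
        else 0) := by
  cases CA with
  | nil => simp
  | cons y t =>
    cases RA with
    | nil => exact absurd rfl hRA
    | cons x s =>
      simp only [foldl_max_add_eq]
      have hcomm : (fun (res a : Int) => max res (a + t.foldl max y))
          = fun res a => max res (t.foldl max y + a) := by
        funext res a; rw [add_comm]
      rw [hcomm, foldl_max_add_eq]
      simp [PySem.List.max?_id_cons, add_comm]

theorem row_fold (r : List String) (c : Int) :
    (PySem.List.pyRange 0 c).foldl
      (fun cnt j => if PySem.List.pyGetD r j "" = "1" then cnt + 1 else cnt - 1) 0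
    = ((PySem.List.pyRange 0 c).map (fun j => if PySem.List.pyGetD r j "" = "1" then (1 : Int) else -1)).sum := by
  rw [foldl_if_eq_sum, zero_add]

theorem col_fold (M : List (List String)) (j : Int) :
    (PySem.List.pyRange 0 (PySem.List.len M)).foldl
      (fun cnt i => if PySem.List.pyGetD (PySem.List.pyGetD M i []) j "" = "1" then cnt + 1 else cnt - 1) 0
    = (M.map (fun r => if PySem.List.pyGetD r j "" = "1" then (1 : Int) else -1)).sum := by
  rw [PySem.List.foldl_pyRange_zero_pyGetD M ([] : List String)
      (fun cnt r => if PySem.List.pyGetD r j "" = "1" then cnt + 1 else cnt - 1) 0,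
    foldl_if_row_eq_sum, zero_add]

theorem outer_fold (RA CA : List Int) (c : Int) :
    (PySem.List.pyRange 0 (PySem.List.len RA)).foldl
      (fun res i => (PySem.List.pyRange 0 c).foldl
        (fun res2 j => max res2 (PySem.List.pyGetD RA i 0 + PySem.List.pyGetD CA j 0)) res) 0
    = RA.foldl (fun res a => (PySem.List.pyRange 0 c).foldl
        (fun res2 j => max res2 (a + PySem.List.pyGetD CA j 0)) res) 0 :=
  PySem.List.foldl_pyRange_zero_pyGetD RA 0
    (fun res a => (PySem.List.pyRange 0 c).foldl (fun res2 j => max res2 (a + PySem.List.pyGetD CA j 0)) res) 0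

theorem inner_fold (CA : List Int) (c : Int) (hc : c = (CA.length : Int)) (a res : Int) :
    (PySem.List.pyRange 0 c).foldl (fun r j => max r (a + PySem.List.pyGetD CA j 0)) res
    = CA.foldl (fun r b => max r (a + b)) res := by
  subst hc; exact PySem.List.foldl_pyRange_zero_pyGetD' CA 0 (fun r b => max r (a + b)) res

-- ===== VERDICT (by name: the statement is the Claim_ definition above) =====
theorem grey_spec : Claim_equal_grey := by
  intro matrix _ hpre
  unfold Spec_grey
  simp only [grey, grey_alt]
  set c := PySem.List.len (PySem.List.pyGetD matrix 0 []) with hcdef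
  have hc : 0 ≤ c := by rw [hcdef, PySem.List.len_eq]; positivity
  simp only [col_fold, row_fold]
  simp only [map_over_rows matrix
    (fun r => ((PySem.List.pyRange 0 c).map
      (fun j => if PySem.List.pyGetD r j "" = "1" then (1 : Int) else -1)).sum)]
  have hlen : PySem.List.len matrix
      = PySem.List.len (matrix.map (fun r => ((PySem.List.pyRange 0 c).map
          (fun j => if PySem.List.pyGetD r j "" = "1" then (1 : Int) else -1)).sum)) := by
    simp [PySem.List.len_eq]
  rw [hlen, outer_fold]
  have hCAlen : c = (((PySem.List.pyRange 0 c).map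
      (fun j => (matrix.map (fun r => if PySem.List.pyGetD r j "" = "1" then (1 : Int) else -1)).sum)).length : Int) := by
    simp [PySem.List.length_pyRange_one]
    omega
  simp only [inner_fold _ c hCAlen]
  exact double_fold_max _ _ (by simpa using hpre.1)
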